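-- pv_equiv track=rewrite | github.com/PandaDrunkard/proex | u-tokyo/2014-winter/5.py | mul_f
-- ===== SOURCE A (Python) =====
-- def mul_f(f1, f2):
--     b1, e1 = f1
--     b2, e2 = f2
--     size = len(b1)
--
--     ret = [0 for _ in range(2 * size)]
--     for i1, d1 in enumerate(b1):
--         s = 0 # 繰り上がり
--         for i2, d2 in enumerate(b2):
--             tmp = ret[i1 + i2] + d1 * d2 + s
--             s = tmp // 10
--             ret[i1 + i2] = tmp % 10
--         ret[i1 + len(b2)] += s
--
--     exp = 0
--     if ret[-1] == 0:
--         ret = ret[:-1]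
--         exp = -1
--
--     base, exp = ret[-size:], e1 + e2 + 1 + exp
--
--     return base, exp
-- ===== SOURCE B (Python) =====
-- def mul_f(f1, f2):
--     # Big-integer multiplication instead of schoolbook digit-by-digit:
--     # convert both digit arrays to Python ints (Horner), multiply once,
--     # then read the product's digits back out.
--     b1, e1 = f1
--     b2, e2 = f2
--     size = len(b1)
--     n1 = 0
--     for d in reversed(b1):
--         n1 = n1 * 10 + d
--     n2 = 0
--     for d in reversed(b2):
--         n2 = n2 * 10 + d
--     p = n1 * n2
--     L = size + len(b2) - 1
--     high, low = divmod(p, 10 ** L)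
--     digits = []
--     for _ in range(L):
--         low, r = divmod(low, 10)
--         digits.append(r)
--     digits.append(high)
--     digits.extend([0] * (2 * size - 1 - L))
--     adj = 0
--     if digits[-1] == 0:
--         digits.pop()
--         adj = -1
--     return digits[-size:], e1 + e2 + 1 + adj
-- ===== Notes on version B (the rewrite author's own statement) =====
-- stated objective: faster
-- what changed: A multiplies digit-by-digit with nested carry-propagating loops over a mutable array; B converts both digit arrays to Python big integers (Horner), performs a single big-integer multiplication, and reads the product's digits back out with divmod.
import Mathlib
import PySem

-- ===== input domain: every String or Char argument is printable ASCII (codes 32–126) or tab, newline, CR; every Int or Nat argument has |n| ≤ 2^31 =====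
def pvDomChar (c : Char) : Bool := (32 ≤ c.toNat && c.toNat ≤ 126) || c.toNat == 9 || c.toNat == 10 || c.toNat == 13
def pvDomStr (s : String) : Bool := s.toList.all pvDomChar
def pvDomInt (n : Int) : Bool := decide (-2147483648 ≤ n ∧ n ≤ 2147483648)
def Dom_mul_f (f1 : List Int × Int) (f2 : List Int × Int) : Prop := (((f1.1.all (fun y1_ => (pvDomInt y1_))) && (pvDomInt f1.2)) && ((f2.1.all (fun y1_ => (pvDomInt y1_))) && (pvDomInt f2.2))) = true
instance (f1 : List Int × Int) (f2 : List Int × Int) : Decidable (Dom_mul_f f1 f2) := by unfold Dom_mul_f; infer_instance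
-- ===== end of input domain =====

-- B replaces A's schoolbook digit-by-digit multiplication with one big-integer
-- multiply (Horner in, digit extraction out); equivalence is about return values
-- (A mutates no argument).

-- ===== PORT A =====
-- A's nested schoolbook loops, transliterated; list indices are in range under Pre_,
-- so ret[i] / ret[i] = v are PySem.List.pyGetD / pySetD (the total forms).
def mul_f (f1 : List Int × Int) (f2 : List Int × Int) : List Int × Int :=
  let b1 := f1.1
  let e1 := f1.2
  let b2 := f2.1
  let e2 := f2.2
  let size := b1.length
  let ret0 : List Int := (PySem.List.pyRange 0 (2 * (size : Int)) 1).map (fun _ => 0)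
  let ret := (PySem.List.enumerate b1).foldl (fun ret1 p =>
    let st := (PySem.List.enumerate b2).foldl (fun st q =>
      let tmp := PySem.List.pyGetD st.1 (p.1 + q.1) 0 + p.2 * q.2 + st.2
      (PySem.List.pySetD st.1 (p.1 + q.1) (PySem.Int.mod tmp 10), PySem.Int.floordiv tmp 10))
      (ret1, (0 : Int))
    PySem.List.pySetD st.1 (p.1 + (b2.length : Int))
      (PySem.List.pyGetD st.1 (p.1 + (b2.length : Int)) 0 + st.2)) ret0
  let retExp := if PySem.List.pyGetD ret (-1) 0 = 0
    then (PySem.List.slice ret none (some (-1)), (-1 : Int)) else (ret, 0)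
  (PySem.List.slice retExp.1 (some (-(size : Int))) none, e1 + e2 + 1 + retExp.2)

-- ===== PORT B =====
-- Source B: Horner both arrays into integers, multiply once, divmod the digits back out.
-- L is Nat subtraction; it equals Python's size+len(b2)-1 whenever size ≥ 1 (Pre_).
def mul_f_alt (f1 : List Int × Int) (f2 : List Int × Int) : List Int × Int :=
  let b1 := f1.1
  let e1 := f1.2
  let b2 := f2.1
  let e2 := f2.2
  let size := b1.length
  let n1 := b1.reverse.foldl (fun n d => n * 10 + d) 0
  let n2 := b2.reverse.foldl (fun n d => n * 10 + d) 0
  let p := n1 * n2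
  let L := size + b2.length - 1
  let hl := (PySem.Int.floordiv p (10 ^ L), PySem.Int.mod p (10 ^ L))  -- divmod(p, 10**L), divisor > 0
  let st := (PySem.List.pyRange 0 (L : Int) 1).foldl (fun st _ =>
      (PySem.Int.floordiv st.1 10, st.2 ++ [PySem.Int.mod st.1 10])) (hl.2, ([] : List Int))
  let digits := st.2 ++ [hl.1] ++ List.replicate (2 * size - 1 - L) 0
  let dr := if PySem.List.pyGetD digits (-1) 0 = 0
    then (digits.dropLast, (-1 : Int)) else (digits, 0)
  (PySem.List.slice dr.1 (some (-(size : Int))) none, e1 + e2 + 1 + dr.2)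

-- ===== PRECONDITION & SPEC =====
-- A raises IndexError when b1 is empty (ret[-1]) or when len(b2) > len(b1)
-- (a write past the end of ret); Pre_ excludes exactly those inputs.
def Pre_mul_f (f1 : List Int × Int) (f2 : List Int × Int) : Prop :=
  f1.1 ≠ [] ∧ f2.1.length ≤ f1.1.length
instance (f1 : List Int × Int) (f2 : List Int × Int) : Decidable (Pre_mul_f f1 f2) := by
  unfold Pre_mul_f; infer_instance
def pvWitness_mul_f : (List Int × Int) × (List Int × Int) := (([1], 0), ([2], 0))

def Spec_mul_f (f1 : List Int × Int) (f2 : List Int × Int) (out : List Int × Int) : Prop := out = mul_f_alt f1 f2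
instance (f1 : List Int × Int) (f2 : List Int × Int) (out : List Int × Int) : Decidable (Spec_mul_f f1 f2 out) := by unfold Spec_mul_f; infer_instance

-- ===== CLAIM (what is proved, stated in full; the proofs are below) =====
def Claim_equal_mul_f : Prop := ∀ (f1 : List Int × Int) (f2 : List Int × Int), Dom_mul_f f1 f2 → Pre_mul_f f1 f2 → Spec_mul_f f1 f2 (mul_f f1 f2)

-- ===== LEMMAS AND PROOFS =====

-- value of a little-endian digit list
def pvVal (l : List Int) : Int := l.foldr (fun d n => n * 10 + d) 0

-- digit j of p in base 10 (`/`/`%` on Int are ediv/emod under Mathlib)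
def pvDig (p : Int) (j : Nat) : Int := p / 10 ^ j % 10

-- contents of A's ret array: digits of P below L, the raw carry at L, zeros above
def pvSpec (P : Int) (L j : Nat) : Int :=
  if j < L then pvDig P j else if j = L then P / 10 ^ L else 0

def pvInner (d1 : Int) : List Int → Nat → List Int → Int → List Int × Int
  | [], _, ret, s => (ret, s)
  | d2 :: rest, k, ret, s =>
      let tmp := ret.getD k 0 + d1 * d2 + s
      pvInner d1 rest (k + 1) (ret.set k (tmp % 10)) (tmp / 10)

theorem pvInner_conv (d1 : Int) (b2 : List Int) : ∀ (k a : Nat) (ret : List Int) (s : Int),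
    (PySem.List.enumerate b2 (a : Int)).foldl (fun st q =>
      let tmp := PySem.List.pyGetD st.1 ((k : Int) + q.1) 0 + d1 * q.2 + st.2
      (PySem.List.pySetD st.1 ((k : Int) + q.1) (PySem.Int.mod tmp 10), PySem.Int.floordiv tmp 10))
      (ret, s)
    = pvInner d1 b2 (k + a) ret s := by
  induction b2 with
  | nil => intro k a ret s; simp [PySem.List.enumerate_nil, pvInner]
  | cons d2 rest ih =>
    intro k a ret s
    rw [PySem.List.enumerate_cons]
    simp only [List.foldl_cons]
    have hcast : (k : Int) + (a : Int) = ((k + a : Nat) : Int) := by push_cast; ring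
    rw [show ((a:Int) + 1) = ((a+1 : Nat) : Int) by push_cast; ring]
    rw [ih k (a+1)]
    simp only [hcast, PySem.List.pyGetD_natCast, PySem.List.pySetD_natCast,
      PySem.Int.mod_eq_emod_of_pos (by norm_num : (0:Int) < 10),
      PySem.Int.floordiv_eq_ediv_of_pos (by norm_num : (0:Int) < 10)]
    simp [pvInner, Nat.add_assoc]

def pvOuter (b2 : List Int) : List Int → Nat → List Int → List Int
  | [], _, ret => ret
  | d1 :: rest, k, ret =>
      let st := pvInner d1 b2 k ret 0
      pvOuter b2 rest (k + 1)
        (st.1.set (k + b2.length) (st.1.getD (k + b2.length) 0 + st.2))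

theorem pvOuter_conv (b2 b1 : List Int) : ∀ (a : Nat) (ret : List Int),
    (PySem.List.enumerate b1 (a : Int)).foldl (fun ret1 p =>
      let st := (PySem.List.enumerate b2).foldl (fun st q =>
        let tmp := PySem.List.pyGetD st.1 (p.1 + q.1) 0 + p.2 * q.2 + st.2
        (PySem.List.pySetD st.1 (p.1 + q.1) (PySem.Int.mod tmp 10), PySem.Int.floordiv tmp 10))
        (ret1, (0 : Int))
      PySem.List.pySetD st.1 (p.1 + (b2.length : Int))
        (PySem.List.pyGetD st.1 (p.1 + (b2.length : Int)) 0 + st.2)) ret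
    = pvOuter b2 b1 a ret := by
  induction b1 with
  | nil => intro a ret; simp [PySem.List.enumerate_nil, pvOuter]
  | cons d1 rest ih =>
    intro a ret
    rw [PySem.List.enumerate_cons]
    simp only [List.foldl_cons]
    have hinner := pvInner_conv d1 b2 a 0 ret 0
    simp only [Nat.cast_zero, Nat.add_zero] at hinner
    rw [show ((a:Int) + 1) = ((a+1 : Nat) : Int) by push_cast; ring]
    rw [ih (a+1)]
    simp only [hinner]
    simp only [← Nat.cast_add, PySem.List.pySetD_natCast, PySem.List.pyGetD_natCast]
    simp [pvOuter, List.getD]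


theorem pv_ediv_pow (p : Int) (a b : Nat) : p / 10 ^ a / 10 ^ b = p / 10 ^ (a + b) := by
  rw [pow_add, Int.ediv_ediv_of_nonneg (by positivity)]

theorem pvSum_dig (c : Nat) (q : Int) :
    ((List.range c).map (fun j => pvDig q j * 10 ^ j)).sum + q / 10 ^ c * 10 ^ c = q := by
  induction c with
  | zero => simp
  | succ c ih =>
    rw [List.range_succ, List.map_append, List.sum_append]
    have h1 : q / 10 ^ (c+1) = q / 10 ^ c / 10 := by rw [← pv_ediv_pow q c 1]; norm_num
    have h2 : (10:Int) ^ (c+1) = 10 ^ c * 10 := by ring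
    simp only [List.map_cons, List.map_nil, List.sum_cons, List.sum_nil, add_zero]
    have key : pvDig q c * 10 ^ c + q / 10 ^ (c+1) * 10 ^ (c+1) = q / 10 ^ c * 10 ^ c := by
      rw [h1, h2, pvDig]
      have h := Int.emod_add_mul_ediv (q / 10 ^ c) 10
      nlinarith [h, pow_pos (show (0:Int) < 10 by norm_num) c]
    linarith [ih]

theorem pv_getD_set_ne (l : List Int) (i j : Nat) (v : Int) (h : i ≠ j) :
    (l.set i v).getD j 0 = l.getD j 0 := by
  simp [List.getD, List.getElem?_set_ne h]

theorem pv_getD_set_self (l : List Int) (i : Nat) (v : Int) (h : i < l.length) :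
    (l.set i v).getD i 0 = v := by
  simp [List.getD, h]

theorem pvS_cons (ret : List Int) (k c : Nat) :
    ((List.range (c+1)).map (fun j => ret.getD (k+j) 0 * 10^j)).sum
    = ret.getD k 0 + 10 * ((List.range c).map (fun j => ret.getD (k+1+j) 0 * 10^j)).sum := by
  rw [List.range_succ_eq_map, List.map_cons, List.sum_cons]
  simp only [Nat.add_zero, pow_zero, mul_one, List.map_map]
  congr 1
  rw [← List.sum_map_mul_left]
  congr 1
  apply List.map_congr_left
  intro j _
  simp only [Function.comp, Nat.succ_eq_add_one]
  rw [show k + (j+1) = k+1+j by omega]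
  ring

theorem pvDig_zero (x : Int) : pvDig x 0 = x % 10 := by simp [pvDig]

theorem pvDig_shift (T T' : Int) (hT : T / 10 = T') (i : Nat) (hi : 1 ≤ i) :
    pvDig T i = pvDig T' (i - 1) := by
  rw [pvDig, pvDig, ← hT, show i = 1 + (i-1) by omega, ← pv_ediv_pow]
  norm_num

theorem pvInner_spec (d1 : Int) (b2 : List Int) : ∀ (k : Nat) (ret : List Int) (s : Int),
    k + b2.length ≤ ret.length →
    (pvInner d1 b2 k ret s).2
        = (((List.range b2.length).map (fun j => ret.getD (k + j) 0 * 10 ^ j)).sum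
            + d1 * pvVal b2 + s) / 10 ^ b2.length ∧
    (pvInner d1 b2 k ret s).1.length = ret.length ∧
    ∀ j : Nat, (pvInner d1 b2 k ret s).1.getD j 0 =
      if k ≤ j ∧ j < k + b2.length then
        pvDig (((List.range b2.length).map (fun j => ret.getD (k + j) 0 * 10 ^ j)).sum
            + d1 * pvVal b2 + s) (j - k)
      else ret.getD j 0 := by
  induction b2 with
  | nil =>
    intro k ret s _
    refine ⟨by simp [pvInner, pvVal], by simp [pvInner], ?_⟩
    intro j
    simp only [pvInner, List.length_nil]
    have : ¬ (k ≤ j ∧ j < k + 0) := by omega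
    rw [if_neg this]
  | cons d2 rest ih =>
    intro k ret s hlen
    simp only [List.length_cons] at hlen ⊢
    set tmp := ret.getD k 0 + d1 * d2 + s with htmp
    have hki : k < ret.length := by omega
    have hstep : pvInner d1 (d2 :: rest) k ret s
        = pvInner d1 rest (k+1) (ret.set k (tmp % 10)) (tmp / 10) := rfl
    set ret' := ret.set k (tmp % 10) with hret'
    have hlen' : (k+1) + rest.length ≤ ret'.length := by
      simp [hret', List.length_set]; omega
    obtain ⟨ih1, ih2, ih3⟩ := ih (k+1) ret' (tmp / 10) hlen'
    set T := ((List.range (rest.length+1)).map (fun j => ret.getD (k + j) 0 * 10 ^ j)).sum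
            + d1 * pvVal (d2 :: rest) + s with hT
    set T' := ((List.range rest.length).map (fun j => ret'.getD (k+1 + j) 0 * 10 ^ j)).sum
            + d1 * pvVal rest + tmp / 10 with hT'
    have hSeq : ((List.range rest.length).map (fun j => ret'.getD (k+1 + j) 0 * 10 ^ j)).sum
        = ((List.range rest.length).map (fun j => ret.getD (k+1 + j) 0 * 10 ^ j)).sum := by
      congr 1
      apply List.map_congr_left
      intro j _
      rw [hret', pv_getD_set_ne _ _ _ _ (by omega)]
    have hval : pvVal (d2 :: rest) = pvVal rest * 10 + d2 := by simp [pvVal]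
    have hTT' : T = tmp % 10 + 10 * T' := by
      rw [hT, hT', hSeq, pvS_cons, hval]
      have h := Int.emod_add_mul_ediv tmp 10
      ring_nf
      ring_nf at h
      linarith
    have hTdiv : T / 10 = T' := by
      rw [hTT', Int.add_mul_ediv_left _ _ (by norm_num : (10:Int) ≠ 0),
        Int.ediv_eq_zero_of_lt (Int.emod_nonneg _ (by norm_num)) (Int.emod_lt_of_pos _ (by norm_num))]
      ring
    have hTmod : T % 10 = tmp % 10 := by
      rw [hTT', Int.add_mul_emod_self_left, Int.emod_emod_of_dvd _ (by norm_num)]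
    refine ⟨?_, ?_, ?_⟩
    · have h := pv_ediv_pow T 1 rest.length
      simp only [pow_one] at h
      rw [hstep, ih1, ← hTdiv, h, add_comm 1 rest.length]
    · rw [hstep, ih2, hret', List.length_set]
    · intro j
      rw [hstep, ih3 j]
      by_cases h1 : (k+1) ≤ j ∧ j < k+1+rest.length
      · rw [if_pos h1, if_pos (by omega : k ≤ j ∧ j < k + (rest.length+1))]
        rw [pvDig_shift T T' hTdiv (j - k) (by omega)]
        congr 1
      · rw [if_neg h1]
        by_cases h2 : j = k
        · subst h2
          rw [if_pos (by omega), hret', pv_getD_set_self _ _ _ hki, Nat.sub_self, pvDig_zero, hTmod]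
        · rw [if_neg (by omega), hret', pv_getD_set_ne _ _ _ _ (by omega)]

theorem pvSpec_zero (L j : Nat) : pvSpec 0 L j = 0 := by
  simp [pvSpec, pvDig]

theorem pvDig_split (x : Int) (k j : Nat) (h : k ≤ j) :
    pvDig x j = pvDig (x / 10 ^ k) (j - k) := by
  rw [pvDig, pvDig, pv_ediv_pow x k (j - k), show k + (j - k) = j by omega]

theorem pvDig_add_mul (P x : Int) (k j : Nat) (h : j < k) :
    pvDig (P + x * 10 ^ k) j = pvDig P j := by
  rw [pvDig, pvDig, show (10:Int)^k = 10^(k-j) * 10^j by rw [← pow_add]; congr 1; omega,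
    show P + x * (10^(k-j) * 10^j) = P + x * 10^(k-j) * 10^j by ring,
    Int.add_mul_ediv_right _ _ (by positivity : ((10:Int)^j) ≠ 0),
    show x * 10^(k-j) = (x * 10^(k-j-1)) * 10 by rw [mul_assoc, ← pow_succ]; congr 2; omega]
  rw [show P / 10^j + x * 10^(k-j-1) * 10 = P / 10^j + 10 * (x * 10^(k-j-1)) by ring,
    Int.add_mul_emod_self_left]

theorem pvOuter_spec (b2 : List Int) (rest : List Int) : ∀ (k : Nat) (P : Int) (ret : List Int),
    k + rest.length + b2.length ≤ ret.length →
    (b2 = [] → P = 0) →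
    (∀ j, ret.getD j 0 = pvSpec P (k + b2.length - 1) j) →
    (pvOuter b2 rest k ret).length = ret.length ∧
    ∀ j, (pvOuter b2 rest k ret).getD j 0
        = pvSpec (P + pvVal rest * 10 ^ k * pvVal b2) (k + rest.length + b2.length - 1) j := by
  induction rest with
  | nil =>
    intro k P ret _ _ hret
    refine ⟨rfl, ?_⟩
    intro j
    simpa [pvOuter, pvVal] using hret j
  | cons d1 rest' ih =>
    intro k P ret hlen hP0 hret
    simp only [List.length_cons] at hlen ⊢
    have hki : k + b2.length < ret.length := by omega
    obtain ⟨hi1, hi2, hi3⟩ := pvInner_spec d1 b2 k ret 0 (by omega)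
    set newret := (pvInner d1 b2 k ret 0).1 with hnew
    set ret2 := newret.set (k + b2.length)
        (newret.getD (k + b2.length) 0 + (pvInner d1 b2 k ret 0).2) with hret2
    have hstep : pvOuter b2 (d1 :: rest') k ret = pvOuter b2 rest' (k+1) ret2 := rfl
    by_cases hb2 : b2 = []
    · -- empty b2: everything is zero
      subst hb2
      have hP : P = 0 := hP0 rfl
      subst hP
      have hz : ∀ j, ret.getD j 0 = 0 := fun j => (hret j).trans (pvSpec_zero _ _)
      have hr2 : ret2 = ret := by
        rw [hret2, hnew]
        simp only [pvInner]
        rw [List.getD_eq_getElem ret 0 (by simpa using hki)]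
        simp [List.set_getElem_self]
      have hlen2 : (k+1) + rest'.length + (List.length ([] : List Int)) ≤ ret2.length := by
        rw [hr2]; simpa using (by omega : k + 1 + rest'.length ≤ ret.length)
      obtain ⟨ihl, ihv⟩ := ih (k+1) 0 ret2 hlen2 (fun _ => rfl)
        (by intro j; rw [hr2, hz j, pvSpec_zero])
      refine ⟨by rw [hstep, ihl, hr2], ?_⟩
      intro j
      rw [hstep, ihv j]
      simp [pvVal, pvSpec_zero]
    · have hm : 1 ≤ b2.length := by
        cases b2 with
        | nil => exact absurd rfl hb2
        | cons a l => simp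
      set m := b2.length with hmdef
      set q := P / 10 ^ k with hq
      -- the digit-sum of ret over positions k..k+m-1 is P / 10^k
      have hS : ((List.range m).map (fun j => ret.getD (k + j) 0 * 10 ^ j)).sum = q := by
        have hsd := pvSum_dig (m - 1) q
        rw [show m = (m-1)+1 by omega, List.range_succ, List.map_append, List.sum_append,
          List.map_cons, List.map_nil, List.sum_cons, List.sum_nil]
        have hcongr : List.map (fun j => ret.getD (k + j) 0 * 10 ^ j) (List.range (m-1))
            = List.map (fun j => pvDig q j * 10 ^ j) (List.range (m-1)) := by
          apply List.map_congr_left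
          intro j hj
          rw [List.mem_range] at hj
          rw [hret (k + j), pvSpec, if_pos (by omega), pvDig_split P k (k+j) (by omega),
            show k + j - k = j by omega, ← hq]
        have hlast : ret.getD (k + (m-1)) 0 = q / 10 ^ (m-1) := by
          rw [hret (k + (m-1)), pvSpec, if_neg (by omega), if_pos (by omega), hq,
            pv_ediv_pow P k (m-1)]
          congr 2
          omega
        rw [hcongr, hlast]
        linarith
      set T := q + d1 * pvVal b2 with hTdef
      set P₁ := P + d1 * 10 ^ k * pvVal b2 with hP₁
      have hq1 : P₁ / 10 ^ k = T := by
        rw [hP₁, show P + d1 * 10 ^ k * pvVal b2 = P + (d1 * pvVal b2) * 10 ^ k by ring,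
          Int.add_mul_ediv_right _ _ (by positivity : ((10:Int)^k) ≠ 0), hTdef, hq]
      have hTfull : ((List.range m).map (fun j => ret.getD (k + j) 0 * 10 ^ j)).sum
          + d1 * pvVal b2 + 0 = T := by rw [hS, hTdef]; ring
      -- contents of ret2
      have hr2len : ret2.length = ret.length := by
        rw [hret2, List.length_set, hnew, hi2]
      have hr2 : ∀ j, ret2.getD j 0 = pvSpec P₁ (k + m) j := by
        intro j
        by_cases hj : j = k + m
        · subst hj
          rw [hret2, pv_getD_set_self _ _ _ (by rw [hnew, hi2]; omega)]
          rw [hnew, hi3 (k+m), if_neg (by omega), hi1, hTfull,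
            hret (k+m), pvSpec, if_neg (by omega), if_neg (by omega),
            pvSpec, if_neg (by omega), if_pos rfl]
          rw [show (0:Int) + T / 10 ^ m = T / 10 ^ m by ring, ← hq1, pv_ediv_pow]
        · rw [hret2, pv_getD_set_ne _ _ _ _ (fun h => hj h.symm), hnew, hi3 j, hTfull]
          by_cases h1 : k ≤ j ∧ j < k + m
          · rw [if_pos h1, pvSpec, if_pos (by omega), ← hq1,
              ← pvDig_split P₁ k j (by omega)]
          · rw [if_neg h1, hret j]
            by_cases h2 : j < k
            · rw [pvSpec, if_pos (by omega), pvSpec, if_pos (by omega), hP₁,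
                show P + d1 * 10 ^ k * pvVal b2 = P + (d1 * pvVal b2) * 10 ^ k by ring,
                pvDig_add_mul P (d1 * pvVal b2) k j h2]
            · rw [pvSpec, if_neg (by omega), if_neg (by omega),
                pvSpec, if_neg (by omega), if_neg (by omega)]
      obtain ⟨ihl, ihv⟩ := ih (k+1) P₁ ret2
        (by rw [hr2len]; omega) (fun h => absurd h hb2)
        (by intro j; rw [hr2 j]; congr 1; omega)
      refine ⟨by rw [hstep, ihl, hr2len], ?_⟩
      intro j
      rw [hstep, ihv j]
      congr 1
      · rw [hP₁, show pvVal (d1 :: rest') = pvVal rest' * 10 + d1 by simp [pvVal]]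
        ring
      · omega

theorem pvExtract (c : Nat) : ∀ (q : Int) (acc : List Int),
    (PySem.List.pyRange 0 (c : Int) 1).foldl (fun st _ =>
      (PySem.Int.floordiv st.1 10, st.2 ++ [PySem.Int.mod st.1 10])) (q, acc)
    = (q / 10 ^ c, acc ++ (List.range c).map (fun j => pvDig q j)) := by
  induction c with
  | zero =>
    intro q acc
    rw [show ((0:Nat):Int) = 0 by simp, PySem.List.pyRange_one_eq_nil (by omega)]
    simp
  | succ c ih =>
    intro q acc
    rw [show ((c+1 : Nat):Int) = (c:Int)+1 by push_cast; ring,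
      PySem.List.pyRange_one_succ_right (by positivity), List.foldl_append, ih q acc]
    simp only [List.foldl_cons, List.foldl_nil,
      PySem.Int.mod_eq_emod_of_pos (by norm_num : (0:Int) < 10),
      PySem.Int.floordiv_eq_ediv_of_pos (by norm_num : (0:Int) < 10)]
    have h := pv_ediv_pow q c 1
    simp only [pow_one] at h
    rw [h, List.range_succ, List.map_append, List.map_cons, List.map_nil]
    simp [pvDig, List.append_assoc]

theorem pvDig_mod (p : Int) (L j : Nat) (h : j < L) : pvDig (p % 10 ^ L) j = pvDig p j := by
  conv_rhs => rw [← Int.emod_add_mul_ediv p (10 ^ L)]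
  rw [show p % 10^L + 10^L * (p / 10^L) = p % 10^L + (p / 10^L) * 10^L by ring,
    pvDig_add_mul _ _ _ _ h]

theorem pv_list_eq (xs ys : List Int) (hlen : xs.length = ys.length)
    (h : ∀ j, xs.getD j 0 = ys.getD j 0) : xs = ys := by
  apply List.ext_getElem hlen
  intro i h1 h2
  have := h i
  rwa [List.getD_eq_getElem xs 0 h1, List.getD_eq_getElem ys 0 h2] at this

theorem pvRet0 (n : Nat) :
    ((PySem.List.pyRange 0 (2 * (n : Int)) 1).map (fun _ => (0:Int))) = List.replicate (2*n) 0 := by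
  rw [show (2*(n:Int)) = ((2*n : Nat):Int) by push_cast; ring, PySem.List.pyRange_zero_natCast]
  simp [List.eq_replicate_iff]

theorem pv_getD_replicate (n j : Nat) : (List.replicate n (0:Int)).getD j 0 = 0 := by
  rcases lt_or_ge j n with h | h
  · rw [List.getD_eq_getElem _ _ (by simpa using h)]; simp
  · rw [List.getD_eq_default _ _ (by simpa using h)]

theorem pvCanon_getD (p : Int) (L pad j : Nat) :
    ((List.range L).map (pvDig p) ++ [p / 10 ^ L] ++ List.replicate pad 0).getD j 0
      = if j < L + 1 + pad then pvSpec p L j else 0 := by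
  by_cases h1 : j < L
  · rw [List.getD_eq_getElem _ 0 (by simp; try omega), if_pos (by omega), pvSpec, if_pos h1]
    rw [List.getElem_append_left (by simp; try omega), List.getElem_append_left (by simp; try omega)]
    simp
  · by_cases h2 : j = L
    · subst h2
      rw [List.getD_eq_getElem _ 0 (by simp; try omega), if_pos (by omega), pvSpec, if_neg h1, if_pos rfl]
      rw [List.getElem_append_left (by simp; try omega), List.getElem_append_right (by simp; try omega)]
      simp
    · by_cases h3 : j < L + 1 + pad
      · rw [List.getD_eq_getElem _ 0 (by simp; try omega), if_pos h3, pvSpec, if_neg h1, if_neg h2]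
        rw [List.getElem_append_right (by simp; try omega)]
        simp
      · rw [List.getD_eq_default _ 0 (by simp; try omega), if_neg h3]

theorem mul_f_eq_alt (f1 f2 : List Int × Int) (h : Pre_mul_f f1 f2) :
    mul_f f1 f2 = mul_f_alt f1 f2 := by
  obtain ⟨b1, e1⟩ := f1
  obtain ⟨b2, e2⟩ := f2
  obtain ⟨hne, hm⟩ := h
  simp only at hne hm
  have hsz : 1 ≤ b1.length := List.length_pos_of_ne_nil hne
  -- common abbreviations
  set size := b1.length with hsizedef
  set m := b2.length with hmdef
  set p := pvVal b1 * pvVal b2 with hpdef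
  set L := size + m - 1 with hLdef
  set C : List Int := (List.range L).map (pvDig p) ++ [p / 10 ^ L]
      ++ List.replicate (2 * size - 1 - L) 0 with hCdef
  -- Horner folds compute pvVal
  have hv1 : b1.reverse.foldl (fun n d => n * 10 + d) 0 = pvVal b1 := by
    rw [List.foldl_reverse]; rfl
  have hv2 : b2.reverse.foldl (fun n d => n * 10 + d) 0 = pvVal b2 := by
    rw [List.foldl_reverse]; rfl
  -- A's loop result
  have hconv := pvOuter_conv b2 b1 0 (List.replicate (2 * size) 0)
  simp only [Nat.cast_zero] at hconv
  obtain ⟨hAlen, hAval⟩ := pvOuter_spec b2 b1 0 0 (List.replicate (2 * size) 0)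
    (by simp only [List.length_replicate]; omega) (fun _ => rfl)
    (by intro j; rw [pv_getD_replicate, pvSpec_zero])
  have hA : pvOuter b2 b1 0 (List.replicate (2 * size) 0) = C := by
    apply pv_list_eq
    · rw [hAlen, hCdef]
      simp only [List.length_replicate, List.length_append, List.length_map,
        List.length_range, List.length_cons, List.length_nil]
      omega
    · intro j
      rw [hAval j, hCdef, pvCanon_getD,
        show (0:Int) + pvVal b1 * 10 ^ (0:Nat) * pvVal b2 = p by rw [pow_zero]; ring,
        show 0 + size + m - 1 = L by omega]
      by_cases hj : j < L + 1 + (2 * size - 1 - L)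
      · rw [if_pos hj]
      · rw [if_neg hj, pvSpec, if_neg (by omega), if_neg (by omega)]
  -- B's digit list
  have hpos : (0:Int) < 10 ^ L := by positivity
  have hB : ([] : List Int) ++ (List.range L).map (fun j => pvDig (p % 10 ^ L) j) = (List.range L).map (pvDig p) := by
    rw [List.nil_append]
    apply List.map_congr_left
    intro j hj
    rw [List.mem_range] at hj
    exact pvDig_mod p L j hj
  -- now unfold both ports
  simp only [mul_f, mul_f_alt]
  rw [pvRet0, hconv, hA, hv1, hv2]
  rw [PySem.Int.mod_eq_emod_of_pos hpos, PySem.Int.floordiv_eq_ediv_of_pos hpos]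
  rw [pvExtract, hB, PySem.List.slice_to_neg_one]

-- ===== VERDICT (by name: the statement is the Claim_ definition above) =====
theorem mul_f_spec : Claim_equal_mul_f := by
  intro f1 f2 _ hpre
  exact mul_f_eq_alt f1 f2 hpre
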